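-- pv_equiv track=rewrite | github.com/eunchan-kim/weblog_analyzer | dev/app/Data/log2oData.py | isresponse_length
-- ===== SOURCE A (Python) =====
-- def isstatus(c):
--     for i in c:
--         if ord(i) >= 48 and ord(i) <= 57:
--             continue
--         else:
--             return False
--     if int(c) > 99 and int(c) < 103:
--         return True
--     if int(c) > 199 and int(c) < 209:
--         return True
--     if int(c) > 299 and int(c) < 309:
--         return True
--     if int(c) > 399 and int(c) < 450:
--         return True
--     if int(c) > 499 and int(c) < 512:
--         return True
--     if int(c) == 598 or int(c) == 599:
--         return True
--     return False
--
-- def isresponse_length(c):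
--     for i in c:
--         if ord(i) >= 48 and ord(i) <= 57:
--             continue
--         return False
--     if isstatus(c):
--         return False
--     return True
-- ===== SOURCE B (Python) =====
-- _LIMIT = {1: 3, 2: 9, 3: 9, 4: 50, 5: 12}
--
--
-- def isresponse_length(c):
--     if not c.isdigit():
--         return False
--     h, r = divmod(int(c), 100)
--     if r < _LIMIT.get(h, 0):
--         return False
--     return not (h == 5 and r >= 98)
-- ===== Notes on version B (the rewrite author's own statement) =====
-- stated objective: simpler
-- what changed: Replaces A's two hand-written ord-scan loops (one repeated inside the isstatus helper) and its six-branch absolute-range cascade by a single str.isdigit test plus a divmod(n,100) decomposition classified against a small per-hundreds limit table.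
-- outside the precondition, e.g. on isresponse_length(''): A raises ValueError, B returns False
import Mathlib
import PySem

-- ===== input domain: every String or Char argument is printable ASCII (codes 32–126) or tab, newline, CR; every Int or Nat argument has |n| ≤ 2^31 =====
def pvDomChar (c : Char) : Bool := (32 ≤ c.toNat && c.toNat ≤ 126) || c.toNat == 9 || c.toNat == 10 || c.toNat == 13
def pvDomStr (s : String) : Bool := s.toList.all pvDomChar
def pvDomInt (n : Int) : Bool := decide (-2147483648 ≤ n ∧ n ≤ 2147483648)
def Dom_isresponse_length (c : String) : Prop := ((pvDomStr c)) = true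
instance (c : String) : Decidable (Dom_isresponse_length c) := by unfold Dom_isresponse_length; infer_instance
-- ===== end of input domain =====

-- B replaces A's two manual ord-scan loops and its helper's six-branch range cascade by one
-- str.isdigit test plus a divmod(n, 100) quotient/remainder classification against a small
-- limit table (objective: simpler; equivalence is about the return value, no side effects).


-- ===== PORT A =====
-- A's digit loop: 'for i in c: if 48 <= ord(i) <= 57: continue; else: return False' —
-- the identical loop appears at the top of both isstatus and isresponse_length.
def pvDigitLoop : List Char → Bool
  | [] => true
  | i :: rest => if 48 ≤ i.toNat && i.toNat ≤ 57 then pvDigitLoop rest else false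

def isstatus (c : String) : Bool :=
  if pvDigitLoop c.toList = false then false
  else
    -- int(c); guarded totalization: on Pre_ inputs reaching here the parse succeeds
    let n : Int := (PySem.Int.ofStr? c).getD 0
    if n > 99 && n < 103 then true
    else if n > 199 && n < 209 then true
    else if n > 299 && n < 309 then true
    else if n > 399 && n < 450 then true
    else if n > 499 && n < 512 then true
    else if n == 598 || n == 599 then true
    else false

def isresponse_length (c : String) : Bool :=
  if pvDigitLoop c.toList = false then false
  else if isstatus c then false
  else true

-- ===== PORT B =====
-- _LIMIT = {1: 3, 2: 9, 3: 9, 4: 50, 5: 12}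
def pvLIMIT : PySem.Dict Int Int := ⟨[(1, 3), (2, 9), (3, 9), (4, 50), (5, 12)]⟩

def isresponse_length_alt (c : String) : Bool :=
  -- c.isdigit(): nonempty and every char a digit; hand-ported (exact on the ASCII domain,
  -- where Python's str.isdigit accepts exactly '0'..'9')
  if !(c.toList ≠ [] && c.toList.all PySem.Str.isdigit) then false
  else
    -- h, r = divmod(int(c), 100); guarded totalization: parse and divmod succeed here
    let n : Int := (PySem.Int.ofStr? c).getD 0
    let hr : Int × Int := (PySem.Int.divmod? n 100).getD (0, 0)
    if hr.2 < PySem.Dict.getD pvLIMIT hr.1 0 then false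
    else !(hr.1 == 5 && hr.2 ≥ 98)

-- ===== PRECONDITION & SPEC =====
-- Pre_ excludes only the empty string, on which A raises ValueError from int('') while B returns False.
def Pre_isresponse_length (c : String) : Prop := c ≠ ""
instance (c : String) : Decidable (Pre_isresponse_length c) := by unfold Pre_isresponse_length; infer_instance
def pvWitness_isresponse_length : String := "404"
def Spec_isresponse_length (c : String) (out : Bool) : Prop := out = isresponse_length_alt c
instance (c : String) (out : Bool) : Decidable (Spec_isresponse_length c out) := by unfold Spec_isresponse_length; infer_instance

-- ===== CLAIM (what is proved, stated in full; the proofs are below) =====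
def Claim_equal_isresponse_length : Prop := ∀ (c : String), Dom_isresponse_length c → Pre_isresponse_length c → Spec_isresponse_length c (isresponse_length c)

-- ===== LEMMAS AND PROOFS =====

-- A's per-character test '48 <= ord(i) <= 57' is B's isdigit on each character.
theorem pvIsdigit_char (i : Char) :
    (48 ≤ i.toNat && i.toNat ≤ 57) = PySem.Str.isdigit i := by
  simp only [PySem.Str.isdigit, PySem.Chars.isdigit]
  rw [Bool.eq_iff_iff]
  simp only [Bool.and_eq_true, decide_eq_true_eq, Char.le_def, UInt32.le_iff_toNat_le]
  have h0 : '0'.val.toNat = 48 := rfl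
  have h9 : '9'.val.toNat = 57 := rfl
  have hi : i.toNat = i.val.toNat := rfl
  omega

-- A's digit loop is B's all-isdigit test.
theorem pvDigitLoop_eq_all (l : List Char) :
    pvDigitLoop l = l.all PySem.Str.isdigit := by
  induction l with
  | nil => rfl
  | cons i rest ih =>
    cases hc : (48 ≤ i.toNat && i.toNat ≤ 57) with
    | false => simp [pvDigitLoop, hc, ← pvIsdigit_char]
    | true => simp [pvDigitLoop, hc, ← pvIsdigit_char, ih]

-- B's limit table evaluated on the hundreds digit.
theorem pvLIMIT_getD (h : Int) :
    PySem.Dict.getD pvLIMIT h 0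
      = (if h = 1 then 3 else if h = 2 then 9 else if h = 3 then 9
         else if h = 4 then 50 else if h = 5 then 12 else 0) := by
  by_cases h1 : h = 1
  · subst h1; decide
  by_cases h2 : h = 2
  · subst h2; decide
  by_cases h3 : h = 3
  · subst h3; decide
  by_cases h4 : h = 4
  · subst h4; decide
  by_cases h5 : h = 5
  · subst h5; decide
  have e1 : ((1 : Int) == h) = false := by rw [beq_eq_false_iff_ne]; omega
  have e2 : ((2 : Int) == h) = false := by rw [beq_eq_false_iff_ne]; omega
  have e3 : ((3 : Int) == h) = false := by rw [beq_eq_false_iff_ne]; omega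
  have e4 : ((4 : Int) == h) = false := by rw [beq_eq_false_iff_ne]; omega
  have e5 : ((5 : Int) == h) = false := by rw [beq_eq_false_iff_ne]; omega
  simp [pvLIMIT, PySem.Dict.getD, PySem.Dict.get?, List.find?, e1, e2, e3, e4, e5, h1, h2, h3, h4, h5]

-- A's range cascade on n equals B's divmod-plus-limit-table classification of n.
theorem pvCascade_eq_divmod (n : Int) :
    ((if n > 99 && n < 103 then true
      else if n > 199 && n < 209 then true
      else if n > 299 && n < 309 then true
      else if n > 399 && n < 450 then true
      else if n > 499 && n < 512 then true
      else if n == 598 || n == 599 then true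
      else false) : Bool)
    = (let hr : Int × Int := (PySem.Int.divmod? n 100).getD (0, 0)
       !(if hr.2 < PySem.Dict.getD pvLIMIT hr.1 0 then false
         else !(hr.1 == 5 && hr.2 ≥ 98))) := by
  have h100 : (100 : Int) ≠ 0 := by norm_num
  have hdm : (PySem.Int.divmod? n 100).getD (0, 0)
      = (PySem.Int.floordiv n 100, PySem.Int.mod n 100) := by
    simp [PySem.Int.divmod?, h100, PySem.Int.floordiv, PySem.Int.mod]
  simp only [hdm]
  have hrec := PySem.Int.floordiv_mul_add_mod n 100
  have hr0 := PySem.Int.mod_nonneg n (b := 100) (by norm_num)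
  have hr1 := PySem.Int.mod_lt n (b := 100) (by norm_num)
  rw [pvLIMIT_getD, Bool.eq_iff_iff]
  split_ifs <;>
    (try simp_all only [Bool.or_eq_true, Bool.and_eq_true, decide_eq_true_eq, beq_iff_eq,
      gt_iff_lt, ge_iff_le, Bool.not_eq_true', Bool.not_eq_false', not_le, not_lt, iff_true, true_iff, false_iff,
      true_and, and_true, not_and, not_or, false_implies]) <;>
    omega

-- isstatus c, under a passed digit check, matches B's classifier on n = int(c).
theorem pvIsstatus_eq (c : String) (hd : pvDigitLoop c.toList = true) :
    isstatus c
    = (let n : Int := (PySem.Int.ofStr? c).getD 0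
       let hr : Int × Int := (PySem.Int.divmod? n 100).getD (0, 0)
       !(if hr.2 < PySem.Dict.getD pvLIMIT hr.1 0 then false
         else !(hr.1 == 5 && hr.2 ≥ 98))) := by
  unfold isstatus
  rw [if_neg (by simp [hd])]
  exact pvCascade_eq_divmod ((PySem.Int.ofStr? c).getD 0)

-- ===== VERDICT (by name: the statement is the Claim_ definition above) =====
theorem isresponse_length_spec : Claim_equal_isresponse_length := by
  intro c _ hpre
  unfold Spec_isresponse_length isresponse_length isresponse_length_alt
  have hne : c.toList ≠ [] := fun h => hpre (String.toList_eq_nil_iff.mp h)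
  cases hall : c.toList.all PySem.Str.isdigit with
  | false =>
    have hd : pvDigitLoop c.toList = false := by rw [pvDigitLoop_eq_all, hall]
    simp [hd]
  | true =>
    have hd : pvDigitLoop c.toList = true := by rw [pvDigitLoop_eq_all, hall]
    rw [pvIsstatus_eq c hd]
    simp [hd, hne, hall, Bool.beq_eq_decide_eq]
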